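-- pv_equiv track=rewrite | github.com/Ntropic/Work_Timer | work_timer.py | extract_total_pauses
-- ===== SOURCE A (Python) =====
-- def extract_total_pauses(data, how_many_days, total_pause_time):
--     paused = []
--     if len(data) > how_many_days:
--         for i in range(len(data) - how_many_days, len(data)):
--             paused.append(data[i]['total_pause_time'])
--     else:
--         length = len(data)
--         for i in range(0, how_many_days - length):
--             paused.append(0)
--         for i in range(0, length):
--             paused.append(data[i]['total_pause_time'])
--     paused[len(paused) - 1] = total_pause_time
--     return paused
-- ===== SOURCE B (Python) =====
-- def extract_total_pauses(data, how_many_days, total_pause_time):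
--     # Build the fixed-size window back-to-front in a single pass, then reverse:
--     # walk data from its end; slots past the start of data become the zero padding.
--     out = []
--     i = len(data)
--     for slot in range(how_many_days):
--         i -= 1
--         out.append(data[i]['total_pause_time'] if i >= 0 else 0)
--     out.reverse()
--     out[-1] = total_pause_time
--     return out
-- ===== Notes on version B (the rewrite author's own statement) =====
-- stated objective: alternative
-- what changed: Instead of A's branch on len(data) vs how_many_days with three forward append loops over ranges of data indices, B runs a single backward pass over the slot count, walking data from its end with a decremented cursor so that padding and value extraction merge into one conditional, then reverses the built list before the final overwrite.
import Mathlib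
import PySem

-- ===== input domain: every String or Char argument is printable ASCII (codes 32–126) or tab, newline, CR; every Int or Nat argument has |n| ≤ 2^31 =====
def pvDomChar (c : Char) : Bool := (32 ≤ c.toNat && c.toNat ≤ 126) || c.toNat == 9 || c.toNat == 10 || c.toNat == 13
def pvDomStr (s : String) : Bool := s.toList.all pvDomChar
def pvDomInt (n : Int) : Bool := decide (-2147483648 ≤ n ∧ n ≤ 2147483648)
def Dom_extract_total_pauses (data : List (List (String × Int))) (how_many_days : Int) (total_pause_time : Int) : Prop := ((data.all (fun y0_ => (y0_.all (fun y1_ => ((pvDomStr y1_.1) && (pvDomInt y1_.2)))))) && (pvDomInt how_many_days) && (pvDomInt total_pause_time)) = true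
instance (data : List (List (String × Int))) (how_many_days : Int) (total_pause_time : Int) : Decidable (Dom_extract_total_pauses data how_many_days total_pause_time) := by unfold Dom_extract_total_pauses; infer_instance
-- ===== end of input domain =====

-- B builds the window back-to-front: one loop over the slot count walks data from
-- its end (padding and extraction merge into one conditional), then reverses and
-- overwrites the last slot; alternative decomposition, same cost.


-- ===== PORT A =====
-- dict lookup d['total_pause_time']: first matching key of the association list (Python dict semantics)
def pvTp (d : List (String × Int)) : Int := (d.lookup "total_pause_time").getD 0

def extract_total_pauses (data : List (List (String × Int))) (how_many_days : Int) (total_pause_time : Int) : List Int :=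
  let paused : List Int :=
    if (data.length : Int) > how_many_days then
      (PySem.List.pyRange ((data.length : Int) - how_many_days) (data.length : Int) 1).foldl
        (fun acc i => acc ++ [pvTp (PySem.List.pyGetD data i [])]) []
    else
      let length : Int := (data.length : Int)
      let p1 := (PySem.List.pyRange 0 (how_many_days - length) 1).foldl (fun acc _ => acc ++ [(0 : Int)]) []
      (PySem.List.pyRange 0 length 1).foldl
        (fun acc i => acc ++ [pvTp (PySem.List.pyGetD data i [])]) p1
  -- paused[len(paused)-1] = total_pause_time (IndexError on [] is outside Pre_)
  paused.set (paused.length - 1) total_pause_time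

-- ===== PORT B =====
def extract_total_pauses_alt (data : List (List (String × Int))) (how_many_days : Int) (total_pause_time : Int) : List Int :=
  -- one backward pass: state = (out, i); each slot reads data from the end,
  -- slots past its start append the zero padding; then reverse and overwrite
  let s := (PySem.List.pyRange 0 how_many_days 1).foldl
    (fun (s : List Int × Int) _slot =>
      let i := s.2 - 1
      (s.1 ++ [if 0 ≤ i then pvTp (PySem.List.pyGetD data i []) else 0], i))
    (([] : List Int), (data.length : Int))
  let out := s.1.reverse
  -- out[-1] = total_pause_time (IndexError on [] is outside Pre_)
  out.set (out.length - 1) total_pause_time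

-- ===== PRECONDITION & SPEC =====
-- Pre_ excludes exactly the inputs on which A raises: how_many_days < 1 (the final
-- paused[len-1] assignment hits an empty list: IndexError) and a dict among the
-- accessed tail lacking the 'total_pause_time' key (KeyError).
def Pre_extract_total_pauses (data : List (List (String × Int))) (how_many_days : Int) (total_pause_time : Int) : Prop :=
  1 ≤ how_many_days ∧
  ∀ d ∈ data.drop (data.length - how_many_days.toNat), (d.lookup "total_pause_time").isSome = true
instance (data : List (List (String × Int))) (how_many_days : Int) (total_pause_time : Int) : Decidable (Pre_extract_total_pauses data how_many_days total_pause_time) := by unfold Pre_extract_total_pauses; infer_instance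
def pvWitness_extract_total_pauses : (List (List (String × Int))) × Int × Int := ([[("total_pause_time", 5)]], 3, 7)
def Spec_extract_total_pauses (data : List (List (String × Int))) (how_many_days : Int) (total_pause_time : Int) (out : List Int) : Prop := out = extract_total_pauses_alt data how_many_days total_pause_time
instance (data : List (List (String × Int))) (how_many_days : Int) (total_pause_time : Int) (out : List Int) : Decidable (Spec_extract_total_pauses data how_many_days total_pause_time out) := by unfold Spec_extract_total_pauses; infer_instance

-- ===== CLAIM (what is proved, stated in full; the proofs are below) =====
def Claim_equal_extract_total_pauses : Prop := ∀ (data : List (List (String × Int))) (how_many_days : Int) (total_pause_time : Int), Dom_extract_total_pauses data how_many_days total_pause_time → Pre_extract_total_pauses data how_many_days total_pause_time → Spec_extract_total_pauses data how_many_days total_pause_time (extract_total_pauses data how_many_days total_pause_time)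

-- ===== LEMMAS AND PROOFS =====

-- B's backward loop: the fold over range(a,b) with counter state yields the mapped range
theorem pv_foldB (g : Int → Int → Int) (a b c : Int) (acc : List Int) :
    (PySem.List.pyRange a b 1).foldl
      (fun (s : List Int × Int) slot => (s.1 ++ [g slot (s.2 - 1)], s.2 - 1)) (acc, c - a)
    = (acc ++ (PySem.List.pyRange a b 1).map (fun slot => g slot (c - 1 - slot)), c - max a b) := by
  by_cases hab : a < b
  · have hn : (b - a).toNat ≠ 0 := by omega
    generalize hN : (b - a).toNat = N at hn
    induction N generalizing a acc with
    | zero => omega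
    | succ N ih =>
      rw [PySem.List.pyRange_one_cons hab]
      simp only [List.foldl_cons, List.map_cons]
      have h1 : c - a - 1 = c - (a + 1) := by ring
      have h2 : g a (c - a - 1) = g a (c - 1 - a) := by rw [show c - a - 1 = c - 1 - a by ring]
      rw [h2, h1]
      by_cases hab' : a + 1 < b
      · rw [ih (a + 1) (acc ++ [g a (c - 1 - a)]) hab' (by omega) (by omega)]
        have : max (a + 1) b = max a b := by omega
        simp [this]
      · have hb : b = a + 1 := by omega
        subst hb
        rw [PySem.List.pyRange_one_eq_nil (le_refl (a+1))]
        simp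
  · rw [PySem.List.pyRange_one_eq_nil (by omega)]
    simp; omega

-- A's zero-padding loop appends replicate zeros
theorem pv_zeros (n : Int) (init : List Int) :
    (PySem.List.pyRange 0 n 1).foldl (fun acc _ => acc ++ [(0 : Int)]) init
      = init ++ List.replicate n.toNat 0 := by
  rw [show (fun (acc : List Int) (_ : Int) => acc ++ [(0 : Int)])
        = (fun (acc : List Int) (x : Int) => acc ++ [(fun _ : Int => (0 : Int)) x]) from rfl]
  rw [PySem.List.foldl_append_singleton_eq_map]
  simp [List.map_const', PySem.List.length_pyRange_one]

-- A's value on the admitted inputs, as one closed list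
theorem pvA_char (data : List (List (String × Int))) (hmd tpt : Int) (h1 : 1 ≤ hmd) :
    extract_total_pauses data hmd tpt
    = (List.replicate (hmd - (data.length : Int)).toNat 0
        ++ (data.drop (data.length - hmd.toNat)).map pvTp).set (hmd.toNat - 1) tpt := by
  unfold extract_total_pauses
  by_cases h : ((data.length : Int) > hmd)
  · rw [if_pos h]
    rw [PySem.List.foldl_pyRange_pyGetD' data [] (fun acc d => acc ++ [pvTp d]) [] (by omega)]
    rw [PySem.List.foldl_append_singleton_eq_map]
    have hz : (hmd - (data.length : Int)).toNat = 0 := by omega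
    have hlen : ((data.drop (data.length - hmd.toNat)).map pvTp).length = hmd.toNat := by
      simp [List.length_drop]; omega
    have hd : ((data.length : Int) - hmd).toNat = data.length - hmd.toNat := by omega
    simp only [hz, List.replicate_zero, List.nil_append]
    rw [hd, hlen]
  · rw [if_neg h]
    simp only []
    rw [pv_zeros]
    rw [PySem.List.foldl_pyRange_zero_pyGetD' data [] (fun acc d => acc ++ [pvTp d])]
    rw [PySem.List.foldl_append_singleton_eq_map]
    have hq : data.length - hmd.toNat = 0 := by omega
    have hlen : (List.replicate (hmd - (data.length : Int)).toNat 0 ++ data.map pvTp).length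
        = hmd.toNat := by simp; omega
    rw [hq, List.drop_zero]
    simp only [List.nil_append]
    rw [hlen]

-- ===== VERDICT (by name: the statement is the Claim_ definition above) =====
theorem extract_total_pauses_spec : Claim_equal_extract_total_pauses := by
  intro data hmd tpt _dom hpre
  obtain ⟨h1, -⟩ := hpre
  unfold Spec_extract_total_pauses extract_total_pauses_alt
  simp only []
  rw [show ((data.length : Int)) = (data.length : Int) - 0 by ring]
  rw [pv_foldB (fun _slot i => if 0 ≤ i then pvTp (PySem.List.pyGetD data i []) else 0) 0 hmd (data.length) []]
  simp only [List.nil_append]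
  rw [pvA_char data hmd tpt h1]
  set n := hmd.toNat with hn
  have hmdn : hmd = (n : Int) := by omega
  have hL : ((PySem.List.pyRange 0 hmd 1).map
        (fun slot => if 0 ≤ (data.length : Int) - 1 - slot then pvTp (PySem.List.pyGetD data ((data.length : Int) - 1 - slot) []) else 0)).reverse
      = List.replicate (hmd - (data.length : Int)).toNat 0 ++ (data.drop (data.length - n)).map pvTp := by
    apply List.ext_getElem
    · simp [PySem.List.length_pyRange_one]; omega
    · intro j hj1 hj2
      have hjn : j < n := by simp [PySem.List.length_pyRange_one] at hj1; omega
      simp only [List.getElem_reverse, List.getElem_map, List.length_map,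
        PySem.List.length_pyRange_one, PySem.List.getElem_pyRange_one]
      have hs : (0 : Int) + (((hmd - 0).toNat - 1 - j : Nat) : Int) = (n : Int) - 1 - (j : Int) := by
        omega
      rw [hs]
      have hi : (data.length : Int) - 1 - ((n : Int) - 1 - (j : Int))
          = (data.length : Int) - (n : Int) + (j : Int) := by ring
      rw [hi]
      by_cases hz : (j : Int) < (n : Int) - (data.length : Int)
      · -- padding zone: i < 0 in B, a replicate zero in A
        rw [if_neg (by omega : ¬ (0 : Int) ≤ (data.length : Int) - (n : Int) + (j : Int))]
        rw [List.getElem_append_left (by simp; omega)]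
        simp
      · -- data zone: both read the same data element
        have hge : 0 ≤ (data.length : Int) - (n : Int) + (j : Int) := by omega
        have hlt : (data.length : Int) - (n : Int) + (j : Int) < (data.length : Int) := by omega
        rw [if_pos hge]
        rw [PySem.List.pyGetD_eq_getElem data [] hge (by exact_mod_cast hlt)]
        have hp : (List.replicate (hmd - (data.length : Int)).toNat (0 : Int)).length
            = n - data.length := by simp; omega
        rw [List.getElem_append_right (by rw [hp]; omega)]
        rw [List.getElem_map, List.getElem_drop]
        have hidx2 : data.length - n + (j - (List.replicate (hmd - (data.length : Int)).toNat (0 : Int)).length)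
            = ((data.length : Int) - (n : Int) + (j : Int)).toNat := by
          rw [hp]; omega
        simp only [hidx2]
  rw [hL]
  have hlen2 : (List.replicate (hmd - (data.length : Int)).toNat (0 : Int)
      ++ (data.drop (data.length - n)).map pvTp).length = n := by
    simp; omega
  rw [hlen2]
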